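-- pv_equiv track=rewrite | github.com/pytorch/serve | mms/utils/mxnet/nlp.py | encode_sentences
-- ===== SOURCE A (Python) =====
-- def encode_sentences(sentences, vocab=None, invalid_label=-1, invalid_key='\n', start_label=0):
--     """Encode sentences and (optionally) build a mapping
--     from string tokens to integer indices. Unknown keys
--     will be added to vocabulary.
--
--     Parameters
--     ----------
--     sentences : list of list of str
--         A list of sentences to encode. Each sentence
--         should be a list of string tokens.
--     vocab : None or dict of str -> int
--         Optional input Vocabulary
--     invalid_label : int, default -1
--         Index for invalid token, like <end-of-sentence>
--     invalid_key : str, default '\\n'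
--         Key for invalid token. Use '\\n' for end
--         of sentence by default.
--     start_label : int
--         lowest index.
--
--     Returns
--     -------
--     result : list of list of int
--         encoded sentences
--     vocab : dict of str -> int
--         result vocabulary
--     """
--     idx = start_label
--     if vocab is None:
--         vocab = {invalid_key: invalid_label}
--         new_vocab = True
--     else:
--         new_vocab = False
--     res = []
--     for sent in sentences:
--         coded = []
--         for word in sent:
--             if word not in vocab:
--                 if not new_vocab:
--                     coded.append(invalid_label)
--                     continue
--                 else:
--                     if idx == invalid_label:
--                         idx += 1
--                     vocab[word] = idx
--                     idx += 1
--             coded.append(vocab[word])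
--         res.append(coded)
--
--     return res, vocab
-- ===== SOURCE B (Python) =====
-- def encode_sentences(sentences, vocab=None, invalid_label=-1, invalid_key='\n', start_label=0):
--     new_vocab = vocab is None
--     if new_vocab:
--         vocab = {invalid_key: invalid_label}
--         idx = start_label
--         # Phase 1: build the full vocabulary in first-appearance order.
--         for sent in sentences:
--             for word in sent:
--                 if word not in vocab:
--                     if idx == invalid_label:
--                         idx += 1
--                     vocab[word] = idx
--                     idx += 1
--         # Phase 2: every word is now present; encode by direct lookup.
--         res = [[vocab[word] for word in sent] for sent in sentences]
--     else:
--         # Pre-supplied vocabulary is never extended: unknown words map to invalid_label.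
--         res = [[vocab.get(word, invalid_label) for word in sent] for sent in sentences]
--     return res, vocab
-- ===== Notes on version B (the rewrite author's own statement) =====
-- stated objective: alternative
-- what changed: Replaces A's single fused loop (which interleaves vocabulary growth with encoding and per-word branching on new_vocab) by two phases: first build the complete vocabulary (only when none was supplied), then encode all sentences by plain lookups/comprehensions.
import Mathlib
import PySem

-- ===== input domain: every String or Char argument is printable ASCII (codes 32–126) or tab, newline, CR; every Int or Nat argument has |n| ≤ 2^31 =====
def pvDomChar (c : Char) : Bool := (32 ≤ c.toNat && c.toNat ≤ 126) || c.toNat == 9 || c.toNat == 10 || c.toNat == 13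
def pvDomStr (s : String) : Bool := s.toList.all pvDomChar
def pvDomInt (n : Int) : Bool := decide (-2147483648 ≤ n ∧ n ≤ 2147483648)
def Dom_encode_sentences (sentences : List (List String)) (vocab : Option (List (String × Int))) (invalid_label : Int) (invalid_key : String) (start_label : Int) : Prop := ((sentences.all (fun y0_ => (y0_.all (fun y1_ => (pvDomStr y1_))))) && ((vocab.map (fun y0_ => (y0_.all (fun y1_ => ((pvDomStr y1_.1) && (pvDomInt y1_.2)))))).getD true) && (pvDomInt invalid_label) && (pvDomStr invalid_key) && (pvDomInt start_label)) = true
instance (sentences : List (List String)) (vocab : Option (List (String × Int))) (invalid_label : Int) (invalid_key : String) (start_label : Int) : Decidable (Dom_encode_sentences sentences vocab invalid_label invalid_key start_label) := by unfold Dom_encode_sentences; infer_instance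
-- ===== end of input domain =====

-- B splits A's fused encode-and-grow loop into two phases — build the vocabulary first, then encode by lookup (alternative decomposition, same cost).


-- ===== PORT A =====
-- A's fused loop body for one word, state (coded, vocab, idx); `vocab[word]` is always
-- present where A reads it, so Python's `vocab[word]` is ported as `getD _ 0` (default unused).
def pvAWord (new_vocab : Bool) (invalid_label : Int) (st2 : List Int × PySem.Dict String Int × Int) (word : String) : List Int × PySem.Dict String Int × Int :=
  if !(st2.2.1.contains word) then
    if !new_vocab then (st2.1 ++ [invalid_label], st2.2.1, st2.2.2)   -- `continue`
    else
      let idx' := if st2.2.2 = invalid_label then st2.2.2 + 1 else st2.2.2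
      let vb' := st2.2.1.insert word idx'
      (st2.1 ++ [vb'.getD word 0], vb', idx' + 1)
  else (st2.1 ++ [st2.2.1.getD word 0], st2.2.1, st2.2.2)

-- A's loop body for one sentence, state (res, vocab, idx)
def pvASent (new_vocab : Bool) (invalid_label : Int) (st : List (List Int) × PySem.Dict String Int × Int) (sent : List String) : List (List Int) × PySem.Dict String Int × Int :=
  let inner := sent.foldl (pvAWord new_vocab invalid_label) ([], st.2.1, st.2.2)
  (st.1 ++ [inner.1], inner.2.1, inner.2.2)

def encode_sentences (sentences : List (List String)) (vocab : Option (List (String × Int))) (invalid_label : Int) (invalid_key : String) (start_label : Int) : List (List Int) × (List (String × Int)) :=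
  let (vocab0, new_vocab) :=
    match vocab with
    | none => (PySem.Dict.ofList [(invalid_key, invalid_label)], true)
    | some v => (PySem.Dict.ofList v, false)
  let fin := sentences.foldl (pvASent new_vocab invalid_label) ([], vocab0, start_label)
  (fin.1, fin.2.1.items)

-- ===== PORT B =====
-- Phase-1 body of B: register one word, state (vocab, idx)
def pvBWord (invalid_label : Int) (st2 : PySem.Dict String Int × Int) (word : String) : PySem.Dict String Int × Int :=
  if !(st2.1.contains word) then
    let idx' := if st2.2 = invalid_label then st2.2 + 1 else st2.2
    (st2.1.insert word idx', idx' + 1)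
  else st2

def pvBSent (invalid_label : Int) (st : PySem.Dict String Int × Int) (sent : List String) : PySem.Dict String Int × Int :=
  sent.foldl (pvBWord invalid_label) st

def encode_sentences_alt (sentences : List (List String)) (vocab : Option (List (String × Int))) (invalid_label : Int) (invalid_key : String) (start_label : Int) : List (List Int) × (List (String × Int)) :=
  match vocab with
  | none =>
    let vbF := (sentences.foldl (pvBSent invalid_label) (PySem.Dict.ofList [(invalid_key, invalid_label)], start_label)).1
    (sentences.map (fun sent => sent.map (fun w => vbF.getD w 0)), vbF.items)
  | some v =>
    let vb := PySem.Dict.ofList v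
    (sentences.map (fun sent => sent.map (fun w => vb.getD w invalid_label)), vb.items)

-- ===== PRECONDITION & SPEC =====
def Spec_encode_sentences (sentences : List (List String)) (vocab : Option (List (String × Int))) (invalid_label : Int) (invalid_key : String) (start_label : Int) (out : List (List Int) × (List (String × Int))) : Prop := out = encode_sentences_alt sentences vocab invalid_label invalid_key start_label
instance (sentences : List (List String)) (vocab : Option (List (String × Int))) (invalid_label : Int) (invalid_key : String) (start_label : Int) (out : List (List Int) × (List (String × Int))) : Decidable (Spec_encode_sentences sentences vocab invalid_label invalid_key start_label out) := by unfold Spec_encode_sentences; infer_instance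

-- ===== CLAIM (what is proved, stated in full; the proofs are below) =====
def Claim_equal_encode_sentences : Prop := ∀ (sentences : List (List String)) (vocab : Option (List (String × Int))) (invalid_label : Int) (invalid_key : String) (start_label : Int), Dom_encode_sentences sentences vocab invalid_label invalid_key start_label → Spec_encode_sentences sentences vocab invalid_label invalid_key start_label (encode_sentences sentences vocab invalid_label invalid_key start_label)

-- ===== LEMMAS AND PROOFS =====

-- Phase-1 folds only ever insert ABSENT keys, so every existing binding survives.
theorem pvB_get?_mono_sent (il : Int) (l : List String) (st : PySem.Dict String Int × Int) (w : String) (x : Int) (h : st.1.get? w = some x) : (l.foldl (pvBWord il) st).1.get? w = some x := by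
  induction l generalizing st with
  | nil => exact h
  | cons a rest ih =>
    simp only [List.foldl_cons]
    apply ih
    unfold pvBWord
    by_cases hc : st.1.contains a = true
    · simp [hc, h]
    · simp only [Bool.not_eq_true] at hc
      have hne : w ≠ a := by
        intro he; subst he
        rw [PySem.Dict.contains_eq_isSome_get?, h] at hc; simp at hc
      simp [hc, PySem.Dict.get?_insert_of_ne _ _ hne, h]

theorem pvB_get?_mono (il : Int) (ls : List (List String)) (st : PySem.Dict String Int × Int) (w : String) (x : Int) (h : st.1.get? w = some x) : (ls.foldl (pvBSent il) st).1.get? w = some x := by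
  induction ls generalizing st with
  | nil => exact h
  | cons s rest ih =>
    simp only [List.foldl_cons]
    exact ih _ (pvB_get?_mono_sent il s st w x h)

-- After phase 1 over a sentence every word of that sentence is bound.
theorem pvB_contains_sent (il : Int) (l : List String) (st : PySem.Dict String Int × Int) (w : String) (h : w ∈ l ∨ st.1.contains w = true) : (l.foldl (pvBWord il) st).1.contains w = true := by
  induction l generalizing st with
  | nil => simp only [List.foldl_nil]; exact h.resolve_left (by simp)
  | cons a rest ih =>
    simp only [List.foldl_cons]
    apply ih
    rcases h with h | h
    · rcases List.mem_cons.1 h with rfl | hm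
      · right
        unfold pvBWord
        by_cases hc : st.1.contains w = true
        · simp [hc]
        · simp only [Bool.not_eq_true] at hc
          simp [hc, PySem.Dict.contains_insert_self]
      · exact Or.inl hm
    · right
      unfold pvBWord
      by_cases hc : st.1.contains a = true
      · simpa [hc]
      · simp only [Bool.not_eq_true] at hc
        simp [hc, PySem.Dict.contains_insert, h]

-- One sentence of A's fused loop = phase-1 fold + lookups in the sentence-final vocab.
theorem pvA_inner_new (il : Int) (l : List String) (vb : PySem.Dict String Int) (idx : Int) (coded : List Int) :
    l.foldl (pvAWord true il) (coded, vb, idx)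
      = (coded ++ l.map (fun w => (l.foldl (pvBWord il) (vb, idx)).1.getD w 0),
         (l.foldl (pvBWord il) (vb, idx)).1, (l.foldl (pvBWord il) (vb, idx)).2) := by
  induction l generalizing vb idx coded with
  | nil => simp
  | cons a rest ih =>
    simp only [List.foldl_cons, List.map_cons]
    by_cases hc : vb.contains a = true
    · have hs := hc
      rw [PySem.Dict.contains_eq_isSome_get?] at hs
      obtain ⟨x, hx⟩ := Option.isSome_iff_exists.1 hs
      have hF := pvB_get?_mono_sent il rest (vb, idx) a x hx
      rw [show pvAWord true il (coded, vb, idx) a = (coded ++ [vb.getD a 0], vb, idx) by simp [pvAWord, hc]]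
      rw [show pvBWord il (vb, idx) a = (vb, idx) by simp [pvBWord, hc]]
      rw [ih]
      simp [PySem.Dict.getD_eq_get?_getD, hx, hF]
    · simp only [Bool.not_eq_true] at hc
      rw [show pvAWord true il (coded, vb, idx) a
            = (coded ++ [(vb.insert a (if idx = il then idx + 1 else idx)).getD a 0],
               vb.insert a (if idx = il then idx + 1 else idx), (if idx = il then idx + 1 else idx) + 1) by
          simp [pvAWord, hc]]
      rw [show pvBWord il (vb, idx) a
            = (vb.insert a (if idx = il then idx + 1 else idx), (if idx = il then idx + 1 else idx) + 1) by
          simp [pvBWord, hc]]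
      have hF := pvB_get?_mono_sent il rest
        (vb.insert a (if idx = il then idx + 1 else idx), (if idx = il then idx + 1 else idx) + 1) a _
        (PySem.Dict.get?_insert_self vb a (if idx = il then idx + 1 else idx))
      rw [ih]
      simp [PySem.Dict.getD_eq_get?_getD, hF]

-- A's whole loop (new-vocab case) = phase 1 then map over the final vocab.
theorem pvA_outer_new (il : Int) (ls : List (List String)) (vb : PySem.Dict String Int) (idx : Int) (res : List (List Int)) :
    ls.foldl (pvASent true il) (res, vb, idx)
      = (res ++ ls.map (fun s => s.map (fun w => (ls.foldl (pvBSent il) (vb, idx)).1.getD w 0)),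
         (ls.foldl (pvBSent il) (vb, idx)).1, (ls.foldl (pvBSent il) (vb, idx)).2) := by
  induction ls generalizing vb idx res with
  | nil => simp
  | cons s rest ih =>
    simp only [List.foldl_cons, List.map_cons]
    rw [show pvASent true il (res, vb, idx) s
          = (res ++ [s.map (fun w => (s.foldl (pvBWord il) (vb, idx)).1.getD w 0)],
             (s.foldl (pvBWord il) (vb, idx)).1, (s.foldl (pvBWord il) (vb, idx)).2) by
        simp [pvASent, pvA_inner_new]]
    rw [show pvBSent il (vb, idx) s = s.foldl (pvBWord il) (vb, idx) from rfl]
    rcases hst : s.foldl (pvBWord il) (vb, idx) with ⟨vb1, idx1⟩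
    rw [ih]
    have hmap : s.map (fun w => vb1.getD w 0)
        = s.map (fun w => (rest.foldl (pvBSent il) (vb1, idx1)).1.getD w 0) := by
      apply List.map_congr_left
      intro w hw
      have hc : vb1.contains w = true := by
        have h := pvB_contains_sent il s (vb, idx) w (Or.inl hw)
        rw [hst] at h; exact h
      have hs := hc
      rw [PySem.Dict.contains_eq_isSome_get?] at hs
      obtain ⟨x, hx⟩ := Option.isSome_iff_exists.1 hs
      have h3 := pvB_get?_mono il rest (vb1, idx1) w x hx
      simp [PySem.Dict.getD_eq_get?_getD, hx, h3]
    rw [hmap]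
    simp

-- Pre-supplied-vocab case: A's loop never changes the dict and codes each word to getD _ invalid_label.
theorem pvA_inner_old (il : Int) (l : List String) (vb : PySem.Dict String Int) (idx : Int) (coded : List Int) :
    l.foldl (pvAWord false il) (coded, vb, idx) = (coded ++ l.map (fun w => vb.getD w il), vb, idx) := by
  induction l generalizing coded with
  | nil => simp
  | cons a rest ih =>
    simp only [List.foldl_cons, List.map_cons]
    by_cases hc : vb.contains a = true
    · have : vb.getD a 0 = vb.getD a il := by
        rw [PySem.Dict.contains_eq_isSome_get?] at hc
        obtain ⟨x, hx⟩ := Option.isSome_iff_exists.1 hc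
        simp [PySem.Dict.getD_eq_get?_getD, hx]
      simp [pvAWord, hc, ih, this]
    · simp only [Bool.not_eq_true] at hc
      rw [show pvAWord false il (coded, vb, idx) a = (coded ++ [il], vb, idx) by simp [pvAWord, hc]]
      rw [ih, PySem.Dict.getD_of_not_contains vb il hc]
      simp

theorem pvA_outer_old (il : Int) (ls : List (List String)) (vb : PySem.Dict String Int) (idx : Int) (res : List (List Int)) :
    ls.foldl (pvASent false il) (res, vb, idx) = (res ++ ls.map (fun s => s.map (fun w => vb.getD w il)), vb, idx) := by
  induction ls generalizing res with
  | nil => simp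
  | cons s rest ih =>
    simp only [List.foldl_cons, List.map_cons]
    rw [show pvASent false il (res, vb, idx) s = (res ++ [s.map (fun w => vb.getD w il)], vb, idx) by
      simp [pvASent, pvA_inner_old]]
    rw [ih]; simp

-- ===== VERDICT (by name: the statement is the Claim_ definition above) =====
theorem encode_sentences_spec : Claim_equal_encode_sentences := by
  intro sentences vocab il ik sl _
  unfold Spec_encode_sentences
  cases vocab with
  | none =>
    simp only [encode_sentences, encode_sentences_alt]
    rw [pvA_outer_new]
    simp
  | some v =>
    simp only [encode_sentences, encode_sentences_alt]
    rw [pvA_outer_old]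
    simp
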